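-- pv_equiv track=rewrite | github.com/pgrts/hky | scrape_steps/scrape_sched.py | get_next_key
-- ===== SOURCE A (Python) =====
-- def get_next_key(dic,key):
--     # prepare additional dictionaries
--     ki = dict()
--     ik = dict()
--     offset = 1
--     for i, k in enumerate(dic):
--         ki[k] = i   # dictionary index_of_key
--         ik[i] = k     # dictionary key_of_index
--
--     index_of_key = ki[key]
--     index_of_next_key = index_of_key + offset
--     res = ik[index_of_next_key] if index_of_next_key in ik else None
--     return res
-- ===== SOURCE B (Python) =====
-- def get_next_key(dic, key):
--     found = False
--     for k in dic:
--         if found: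
--             return k
--         if k == key:
--             found = True
--     if found:
--         return None
--     raise KeyError(key)
-- ===== Notes on version B (the rewrite author's own statement) =====
-- stated objective: simpler
-- what changed: B replaces A's two full index dictionaries (key->index, index->key) plus a lookup by a single early-exit scan with a found flag, returning the key right after the match.
import Mathlib
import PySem

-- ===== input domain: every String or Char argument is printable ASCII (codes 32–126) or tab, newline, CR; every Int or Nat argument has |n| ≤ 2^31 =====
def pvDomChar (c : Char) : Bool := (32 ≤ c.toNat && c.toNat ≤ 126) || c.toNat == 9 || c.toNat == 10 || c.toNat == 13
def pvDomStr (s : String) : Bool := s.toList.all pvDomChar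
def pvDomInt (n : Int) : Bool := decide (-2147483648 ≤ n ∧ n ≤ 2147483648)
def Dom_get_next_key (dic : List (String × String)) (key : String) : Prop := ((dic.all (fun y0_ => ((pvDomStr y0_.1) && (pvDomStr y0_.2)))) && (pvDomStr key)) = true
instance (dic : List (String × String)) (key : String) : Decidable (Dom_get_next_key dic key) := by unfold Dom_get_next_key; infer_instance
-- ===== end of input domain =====

-- B changes only the algorithm (one early-exit scan instead of building two index dictionaries); proved equal wherever A returns.
-- ===== PORT A =====
-- 'for i, k in enumerate(dic)' iterates the dict's keys; ki[k] = i and ik[i] = k are dict inserts.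
def get_next_key (dic : List (String × String)) (key : String) : Option String :=
  let keys := dic.map Prod.fst
  let st :=
    (PySem.List.enumerate keys 0).foldl
      (fun (p : PySem.Dict String Int × PySem.Dict Int String) ik =>
        (p.1.insert ik.2 ik.1, p.2.insert ik.1 ik.2))
      (PySem.Dict.empty, PySem.Dict.empty)
  let offset : Int := 1
  match st.1.get? key with
  | none => none            -- Python raises KeyError here (ki[key]); excluded by Pre_
  | some index_of_key =>
      let index_of_next_key := index_of_key + offset
      st.2.get? index_of_next_key   -- 'ik[j] if j in ik else None'

-- ===== PORT B =====
-- the 'for k in dic' loop of Source B carrying the 'found' flag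
def gnkLoop (keys : List String) (key : String) (found : Bool) : Option String :=
  match keys with
  | [] => none              -- 'return None' if found; otherwise Python raises KeyError (excluded by Pre_)
  | k :: rest =>
      if found then some k
      else gnkLoop rest key (found || (k == key))

def get_next_key_alt (dic : List (String × String)) (key : String) : Option String :=
  gnkLoop (dic.map Prod.fst) key false

-- ===== PRECONDITION & SPEC =====
-- Pre_ excludes only inputs where both Pythons raise KeyError (key absent) and association lists with
-- duplicate keys, which do not represent a Python dict (A is always called with a dict).
def Pre_get_next_key (dic : List (String × String)) (key : String) : Prop :=
  (dic.map Prod.fst).Nodup ∧ key ∈ dic.map Prod.fst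
instance (dic : List (String × String)) (key : String) : Decidable (Pre_get_next_key dic key) := by
  unfold Pre_get_next_key; infer_instance
def pvWitness_get_next_key : (List (String × String)) × String := ([("a", "1"), ("b", "2")], "a")

def Spec_get_next_key (dic : List (String × String)) (key : String) (out : Option String) : Prop := out = get_next_key_alt dic key
instance (dic : List (String × String)) (key : String) (out : Option String) : Decidable (Spec_get_next_key dic key out) := by unfold Spec_get_next_key; infer_instance

-- ===== CLAIM (what is proved, stated in full; the proofs are below) =====
def Claim_equal_get_next_key : Prop := ∀ (dic : List (String × String)) (key : String), Dom_get_next_key dic key → Pre_get_next_key dic key → Spec_get_next_key dic key (get_next_key dic key)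

-- ===== LEMMAS AND PROOFS =====

-- the fold of port A, as an abbreviation for the lemmas
def gnkFold (keys : List String) (s : Int)
    (p : PySem.Dict String Int × PySem.Dict Int String) :
    PySem.Dict String Int × PySem.Dict Int String :=
  (PySem.List.enumerate keys s).foldl
    (fun p ik => (p.1.insert ik.2 ik.1, p.2.insert ik.1 ik.2)) p

theorem gnkFold_nil (s : Int) (p : PySem.Dict String Int × PySem.Dict Int String) :
    gnkFold [] s p = p := rfl

theorem gnkFold_cons (k : String) (rest : List String) (s : Int)
    (p : PySem.Dict String Int × PySem.Dict Int String) :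
    gnkFold (k :: rest) s p = gnkFold rest (s + 1) (p.1.insert k s, p.2.insert s k) := by
  simp [gnkFold, PySem.List.enumerate_cons]

theorem gnkFold_fst_not_mem (keys : List String) (key : String) (hk : key ∉ keys) :
    ∀ (s : Int) p, (gnkFold keys s p).1.get? key = p.1.get? key := by
  induction keys with
  | nil => intro s p; rfl
  | cons k rest ih =>
      intro s p
      rw [gnkFold_cons, ih (fun h => hk (List.mem_cons_of_mem _ h))]
      exact PySem.Dict.get?_insert_of_ne _ _ (fun h => hk (h ▸ List.mem_cons_self))

theorem gnkFold_fst (keys : List String) (key : String) (hnd : keys.Nodup) (hk : key ∈ keys) :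
    ∀ (s : Int) p, (gnkFold keys s p).1.get? key = some (s + (keys.idxOf key : Int)) := by
  induction keys with
  | nil => cases hk
  | cons k rest ih =>
      intro s p
      rw [gnkFold_cons]
      by_cases hke : key = k
      · subst hke
        have hnr : key ∉ rest := (List.nodup_cons.mp hnd).1
        rw [gnkFold_fst_not_mem rest key hnr, PySem.Dict.get?_insert_self]
        simp [List.idxOf_cons_self]
      · have hkr : key ∈ rest := (List.mem_cons.mp hk).resolve_left hke
        rw [ih (List.nodup_cons.mp hnd).2 hkr]
        rw [List.idxOf_cons_ne _ (fun h => hke h.symm)]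
        push_cast
        ring_nf

theorem gnkFold_snd (keys : List String) (j : Int) :
    ∀ (s : Int) p, (gnkFold keys s p).2.get? j =
      if s ≤ j ∧ j < s + keys.length then keys[(j - s).toNat]? else p.2.get? j := by
  induction keys with
  | nil =>
      intro s p
      rw [gnkFold_nil, if_neg (by simp)]
  | cons k rest ih =>
      intro s p
      rw [gnkFold_cons, ih]
      by_cases hjs : j = s
      · subst hjs
        rw [if_neg (by simp), if_pos (by constructor <;> simp)]
        simp [PySem.Dict.get?_insert_self]
      · by_cases hin : s + 1 ≤ j ∧ j < s + 1 + rest.length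
        · rw [if_pos hin, if_pos (by simp; omega)]
          have h1 : (j - s).toNat = (j - (s + 1)).toNat + 1 := by omega
          simp [h1]
        · rw [if_neg hin, if_neg (by simp at hin ⊢; omega)]
          exact PySem.Dict.get?_insert_of_ne _ _ hjs

theorem gnkLoop_found (keys : List String) (key : String) :
    gnkLoop keys key true = keys[0]? := by
  cases keys <;> rfl

theorem gnkLoop_spec (keys : List String) (key : String) (hk : key ∈ keys) :
    gnkLoop keys key false = keys[keys.idxOf key + 1]? := by
  induction keys with
  | nil => cases hk
  | cons k rest ih =>
      by_cases hke : k = key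
      · subst hke
        simp only [gnkLoop, Bool.false_or, beq_self_eq_true]
        rw [gnkLoop_found, List.idxOf_cons_self]
        rfl
      · have hkr : key ∈ rest := (List.mem_cons.mp hk).resolve_left (fun h => hke h.symm)
        have hb : (k == key) = false := beq_eq_false_iff_ne.mpr hke
        simp only [gnkLoop, Bool.false_or, if_neg Bool.false_ne_true, hb]
        rw [ih hkr, List.idxOf_cons_ne _ (fun h => hke h)]
        rfl

-- ===== VERDICT (by name: the statement is the Claim_ definition above) =====
theorem get_next_key_spec : Claim_equal_get_next_key := by
  intro dic key _ hpre
  obtain ⟨hnd, hk⟩ := hpre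
  unfold Spec_get_next_key get_next_key get_next_key_alt
  set keys := dic.map Prod.fst with hkeys
  simp only []
  have hA1 := gnkFold_fst keys key hnd hk 0 (PySem.Dict.empty, PySem.Dict.empty)
  have hA2 := gnkFold_snd keys ((keys.idxOf key : Int) + 1) 0 (PySem.Dict.empty, PySem.Dict.empty)
  rw [show (PySem.List.enumerate keys 0).foldl
        (fun (p : PySem.Dict String Int × PySem.Dict Int String) ik =>
          (p.1.insert ik.2 ik.1, p.2.insert ik.1 ik.2))
        (PySem.Dict.empty, PySem.Dict.empty) = gnkFold keys 0 (PySem.Dict.empty, PySem.Dict.empty) from rfl]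
  rw [hA1]
  simp only [zero_add]
  rw [hA2, gnkLoop_spec keys key hk]
  by_cases hlt : keys.idxOf key + 1 < keys.length
  · rw [if_pos (by omega)]
    have ht : (((keys.idxOf key : Int) + 1) - 0).toNat = keys.idxOf key + 1 := by omega
    rw [ht]
  · rw [if_neg (by omega)]
    rw [List.getElem?_eq_none (by omega), PySem.Dict.get?_empty]
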